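-- pv_equiv track=rewrite | github.com/VictorRodasISAK/Year_2 | Quizzes/Quiz_073/Quiz_073.py | check
-- ===== SOURCE A (Python) =====
-- def check(msg):
--     i0 = 0
--     i1 = len(msg) // 3
--     i2 = (len(msg) // 3) * 2
--
--     for i in range(len(msg) // 3):
--         if msg[i0] != msg[i1] or msg[i0] != msg[i2] or msg[i1] != msg[i2]:
--             return True
--         i0 += 1
--         i1 += 1
--         i2 += 1
--     return False
-- ===== SOURCE B (Python) =====
-- def check(msg):
--     k = len(msg) // 3
--     a, b, c = msg[:k], msg[k:2*k], msg[2*k:3*k]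
--     return not (a == b == c)
-- ===== Notes on version B (the rewrite author's own statement) =====
-- stated objective: idiomatic
-- what changed: Replaced the manual three-pointer index loop with early exit by computing the three thirds as slices and comparing them with chained equality.
import Mathlib
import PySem

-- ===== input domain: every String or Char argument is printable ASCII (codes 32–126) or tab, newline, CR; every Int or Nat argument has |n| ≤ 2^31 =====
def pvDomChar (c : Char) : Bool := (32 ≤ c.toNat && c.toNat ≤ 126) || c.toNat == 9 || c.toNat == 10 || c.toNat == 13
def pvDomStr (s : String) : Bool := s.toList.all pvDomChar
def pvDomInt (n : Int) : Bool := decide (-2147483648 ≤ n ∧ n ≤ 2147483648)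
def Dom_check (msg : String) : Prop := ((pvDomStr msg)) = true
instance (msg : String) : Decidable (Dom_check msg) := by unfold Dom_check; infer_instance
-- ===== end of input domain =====

-- B replaces A's three-pointer index loop (early exit) by slicing the message into its
-- three thirds and comparing the slices with chained equality (idiomatic, same cost).


-- ===== PORT A =====
-- the for-loop with running pointers i0, i1, i2 and early 'return True';
-- all three indices are provably in range, so pyGetD is exact for msg[i]
def checkAux (cs : List Char) (i0 i1 i2 : Nat) : Nat → Bool
  | 0 => false
  | n + 1 =>
    if PySem.List.pyGetD cs (i0 : Int) ' ' ≠ PySem.List.pyGetD cs (i1 : Int) ' ' ∨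
       PySem.List.pyGetD cs (i0 : Int) ' ' ≠ PySem.List.pyGetD cs (i2 : Int) ' ' ∨
       PySem.List.pyGetD cs (i1 : Int) ' ' ≠ PySem.List.pyGetD cs (i2 : Int) ' '
    then true
    else checkAux cs (i0 + 1) (i1 + 1) (i2 + 1) n

def check (msg : String) : Bool :=
  let cs := msg.toList
  checkAux cs 0 (cs.length / 3) (cs.length / 3 * 2) (cs.length / 3)

-- ===== PORT B =====
def check_alt (msg : String) : Bool :=
  let cs := msg.toList
  let k : Int := PySem.Int.floordiv (PySem.List.len cs) 3
  let a := PySem.List.slice cs none (some k)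
  let b := PySem.List.slice cs (some k) (some (2 * k))
  let c := PySem.List.slice cs (some (2 * k)) (some (3 * k))
  !(a == b && b == c)

-- ===== PRECONDITION & SPEC =====
def Spec_check (msg : String) (out : Bool) : Prop := out = check_alt msg
instance (msg : String) (out : Bool) : Decidable (Spec_check msg out) := by unfold Spec_check; infer_instance

-- ===== CLAIM (what is proved, stated in full; the proofs are below) =====
def Claim_equal_check : Prop := ∀ (msg : String), Dom_check msg → Spec_check msg (check msg)

-- ===== LEMMAS AND PROOFS =====

-- loop invariant: the loop from a point compares the three remaining segments
theorem checkAux_eq (cs : List Char) :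
    ∀ (n i0 i1 i2 : Nat), i0 + n ≤ cs.length → i1 + n ≤ cs.length → i2 + n ≤ cs.length →
    checkAux cs i0 i1 i2 n =
      !(((cs.drop i0).take n == (cs.drop i1).take n) &&
        ((cs.drop i1).take n == (cs.drop i2).take n)) := by
  intro n
  induction n with
  | zero => intro i0 i1 i2 _ _ _; simp [checkAux]
  | succ n ih =>
    intro i0 i1 i2 h0 h1 h2
    have l0 : i0 < cs.length := by omega
    have l1 : i1 < cs.length := by omega
    have l2 : i2 < cs.length := by omega
    rw [checkAux]
    simp only [PySem.List.pyGetD_natCast, List.getD_eq_getElem?_getD,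
      List.getElem?_eq_getElem l0, List.getElem?_eq_getElem l1, List.getElem?_eq_getElem l2,
      Option.getD_some]
    rw [List.drop_eq_getElem_cons l0, List.drop_eq_getElem_cons l1,
      List.drop_eq_getElem_cons l2]
    simp only [List.take_succ_cons]
    by_cases e01 : cs[i0] = cs[i1] <;> by_cases e12 : cs[i1] = cs[i2]
    · simp only [e01, e12]
      rw [if_neg (by simp)]
      rw [ih (i0+1) (i1+1) (i2+1) (by omega) (by omega) (by omega)]
      simp
    all_goals rw [if_pos (by tauto)]
    all_goals simp
    all_goals tauto

-- ===== VERDICT (by name: the statement is the Claim_ definition above) =====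
theorem check_spec : Claim_equal_check := by
  intro msg _
  unfold Spec_check check check_alt
  set cs := msg.toList with hcs
  set L := cs.length with hL
  have hk : PySem.Int.floordiv (PySem.List.len cs) 3 = ((L / 3 : Nat) : Int) := by
    rw [PySem.List.len_eq]
    exact_mod_cast PySem.Int.floordiv_natCast L 3
  simp only [hk]
  have h2 : (2 * ((L / 3 : Nat) : Int)) = ((2 * (L / 3) : Nat) : Int) := by push_cast; ring
  have h3 : (3 * ((L / 3 : Nat) : Int)) = ((3 * (L / 3) : Nat) : Int) := by push_cast; ring
  rw [h2, h3, PySem.List.slice_to_natCast, PySem.List.slice_natCast, PySem.List.slice_natCast]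
  rw [checkAux_eq cs (L / 3) 0 (L / 3) (L / 3 * 2) (by omega) (by omega) (by omega)]
  have e1 : 2 * (L / 3) - L / 3 = L / 3 := by omega
  have e2 : 3 * (L / 3) - 2 * (L / 3) = L / 3 := by omega
  have e3 : L / 3 * 2 = 2 * (L / 3) := by omega
  rw [e1, e2, e3, List.drop_zero]
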